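-- pv_equiv track=rewrite | github.com/zsyzgu/HandTracking-300Hz | opt.py | check_contact
-- ===== SOURCE A (Python) =====
-- def check_contact(board_contacts, i): # check if the contact is legal or not (at least last for 30 ms)
--     id = -1
--     for c in board_contacts[i]:
--         if c[1] == 1:
--             id = c[0]
--
--     for j in range(i+1, min(i+10,len(board_contacts))):
--         is_exist = False
--         for c in board_contacts[j]:
--             if c[0] == id:
--                 is_exist = True
--         if not is_exist:
--             return False
--
--     return True
-- ===== SOURCE B (Python) =====
-- def check_contact(board_contacts, i):
--     id = -1
--     for c in board_contacts[i]:
--         if c[1] == 1: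
--             id = c[0]
--
--     common = None
--     for j in range(i+1, min(i+10, len(board_contacts))):
--         ids = {c[0] for c in board_contacts[j]}
--         common = ids if common is None else common & ids
--     return common is None or id in common
-- ===== Notes on version B (the rewrite author's own statement) =====
-- stated objective: alternative
-- what changed: The per-frame inner scan with an is_exist flag and early return is replaced by maintaining a running set intersection of the ids of the subsequent frames and doing a single membership test at the end.
import Mathlib
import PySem

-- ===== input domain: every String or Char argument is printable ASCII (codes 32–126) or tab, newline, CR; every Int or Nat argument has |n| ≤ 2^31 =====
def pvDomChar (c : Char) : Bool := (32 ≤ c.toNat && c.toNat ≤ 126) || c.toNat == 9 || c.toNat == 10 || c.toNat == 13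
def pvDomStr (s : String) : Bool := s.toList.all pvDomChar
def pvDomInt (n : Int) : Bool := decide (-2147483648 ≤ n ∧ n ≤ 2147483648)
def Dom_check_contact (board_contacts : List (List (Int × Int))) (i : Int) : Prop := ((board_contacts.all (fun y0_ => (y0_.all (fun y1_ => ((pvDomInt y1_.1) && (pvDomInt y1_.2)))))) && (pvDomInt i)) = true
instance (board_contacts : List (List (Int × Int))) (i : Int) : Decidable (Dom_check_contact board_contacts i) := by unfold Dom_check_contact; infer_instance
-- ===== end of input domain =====

-- B replaces A's per-frame is_exist scan + early return by a running set intersection of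
-- subsequent frames' ids with one membership test at the end (alternative decomposition).

-- ===== PORT A =====
-- the outer 'for j in range(...)' with its early 'return False'
def pvLoopA (bc : List (List (Int × Int))) (id : Int) : List Int → Bool
  | [] => true
  | j :: js =>
    let is_exist := ((PySem.List.pyGet? bc j).getD []).foldl
        (fun acc c => if c.1 == id then true else acc) false
    if !is_exist then false else pvLoopA bc id js

def check_contact (board_contacts : List (List (Int × Int))) (i : Int) : Bool :=
  match PySem.List.pyGet? board_contacts i with
  | none => false   -- IndexError; excluded by Pre_
  | some frame =>
    let id := frame.foldl (fun idv c => if c.2 == 1 then c.1 else idv) (-1)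
    pvLoopA board_contacts id
      (PySem.List.pyRange (i+1) (min (i+10) (board_contacts.length : Int)) 1)

-- ===== PORT B =====
def check_contact_alt (board_contacts : List (List (Int × Int))) (i : Int) : Bool :=
  match PySem.List.pyGet? board_contacts i with
  | none => false   -- IndexError; excluded by Pre_
  | some frame =>
    let id := frame.foldl (fun idv c => if c.2 == 1 then c.1 else idv) (-1)
    let common : Option (PySem.Set Int) :=
      (PySem.List.pyRange (i+1) (min (i+10) (board_contacts.length : Int)) 1).foldl
        (fun acc j =>
          let ids : PySem.Set Int :=
            PySem.Set.ofList (((PySem.List.pyGet? board_contacts j).getD []).map Prod.fst)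
          match acc with
          | none => some ids
          | some s => some (PySem.Set.inter s ids))   -- common & ids
        none
    match common with
    | none => true
    | some s => s.contains id

-- ===== PRECONDITION & SPEC =====
-- Pre_ excludes exactly the indices i on which board_contacts[i] raises IndexError in A (and in B).
def Pre_check_contact (board_contacts : List (List (Int × Int))) (i : Int) : Prop :=
  PySem.Raise.InRange board_contacts.length i
instance (board_contacts : List (List (Int × Int))) (i : Int) : Decidable (Pre_check_contact board_contacts i) := by unfold Pre_check_contact; infer_instance

def pvWitness_check_contact : (List (List (Int × Int))) × Int := ([[(1, 1)], [(1, 0)]], 0)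

def Spec_check_contact (board_contacts : List (List (Int × Int))) (i : Int) (out : Bool) : Prop := out = check_contact_alt board_contacts i
instance (board_contacts : List (List (Int × Int))) (i : Int) (out : Bool) : Decidable (Spec_check_contact board_contacts i out) := by unfold Spec_check_contact; infer_instance

-- ===== CLAIM (what is proved, stated in full; the proofs are below) =====
def Claim_equal_check_contact : Prop := ∀ (board_contacts : List (List (Int × Int))) (i : Int), Dom_check_contact board_contacts i → Pre_check_contact board_contacts i → Spec_check_contact board_contacts i (check_contact board_contacts i)

-- ===== LEMMAS AND PROOFS =====

-- the per-frame predicate both loops decide: does frame j contain id?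
def pvHasId (bc : List (List (Int × Int))) (id : Int) (j : Int) : Bool :=
  (((PySem.List.pyGet? bc j).getD []).map Prod.fst).contains id

theorem pv_exist_scan (id : Int) :
    ∀ (frame : List (Int × Int)) (acc : Bool),
      frame.foldl (fun acc c => if c.1 == id then true else acc) acc
        = (acc || (frame.map Prod.fst).contains id) := by
  intro frame
  induction frame with
  | nil => simp [List.foldl]
  | cons c cs ih =>
    intro acc
    rw [List.foldl_cons, ih]
    by_cases h : c.1 = id
    · subst h; simp
    · have h' : (c.1 == id) = false := by simpa using h
      simp only [h', List.map_cons, List.contains_cons]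
      have h'' : (id == c.1) = false := by simpa using Ne.symm h
      simp [h'']

theorem pv_loopA_eq_all (bc : List (List (Int × Int))) (id : Int) :
    ∀ js : List Int, pvLoopA bc id js = js.all (pvHasId bc id) := by
  intro js
  induction js with
  | nil => rfl
  | cons j js ih =>
    simp only [pvLoopA, pv_exist_scan, Bool.false_or, List.all_cons, ih, pvHasId]
    cases (((PySem.List.pyGet? bc j).getD []).map Prod.fst).contains id <;> simp

theorem pv_ofList_contains (xs : List Int) (id : Int) :
    (PySem.Set.ofList xs).contains id = xs.contains id := by
  simp only [PySem.Set.contains_eq_listContains]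
  by_cases h : id ∈ xs <;> simp [h, PySem.Set.mem_ofList]

theorem pv_inter_contains (s t : PySem.Set Int) (id : Int) :
    (PySem.Set.inter s t).contains id = (s.contains id && t.contains id) := by
  simp only [PySem.Set.contains_eq_listContains]
  by_cases h1 : id ∈ s <;> by_cases h2 : id ∈ t <;>
    simp [h1, h2, PySem.Set.mem_inter]

theorem pv_foldB_some (bc : List (List (Int × Int))) (id : Int) :
    ∀ (js : List Int) (s : PySem.Set Int),
      ∃ s' : PySem.Set Int,
        js.foldl (fun acc j =>
          let ids : PySem.Set Int :=
            PySem.Set.ofList (((PySem.List.pyGet? bc j).getD []).map Prod.fst)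
          match acc with
          | none => some ids
          | some s => some (PySem.Set.inter s ids)) (some s) = some s'
        ∧ s'.contains id = (s.contains id && js.all (pvHasId bc id)) := by
  intro js
  induction js with
  | nil => intro s; exact ⟨s, rfl, by simp⟩
  | cons j js ih =>
    intro s
    obtain ⟨s', hfold, hmem⟩ := ih (PySem.Set.inter s
      (PySem.Set.ofList (((PySem.List.pyGet? bc j).getD []).map Prod.fst)))
    refine ⟨s', hfold, ?_⟩
    rw [hmem, pv_inter_contains, pv_ofList_contains]
    simp only [List.all_cons, pvHasId, Bool.and_assoc]

theorem pv_loops_agree (bc : List (List (Int × Int))) (id : Int) (js : List Int) :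
    pvLoopA bc id js
      = (match js.foldl (fun acc j =>
            let ids : PySem.Set Int :=
              PySem.Set.ofList (((PySem.List.pyGet? bc j).getD []).map Prod.fst)
            match acc with
            | none => some ids
            | some s => some (PySem.Set.inter s ids)) none with
         | none => true
         | some s => s.contains id) := by
  cases js with
  | nil => rfl
  | cons j js =>
    simp only [List.foldl]
    obtain ⟨s', hfold, hmem⟩ := pv_foldB_some bc id js
      (PySem.Set.ofList (((PySem.List.pyGet? bc j).getD []).map Prod.fst))
    rw [hfold]
    simp only [hmem, pv_loopA_eq_all, List.all_cons, pvHasId, pv_ofList_contains]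

-- ===== VERDICT (by name: the statement is the Claim_ definition above) =====
theorem check_contact_spec : Claim_equal_check_contact := by
  intro bc i _ _
  show check_contact bc i = check_contact_alt bc i
  unfold check_contact check_contact_alt
  cases h : PySem.List.pyGet? bc i with
  | none => rfl
  | some frame =>
    simp only
    exact pv_loops_agree bc _ _
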